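-- pv_equiv track=rewrite | github.com/hmxlabs/aws-open-resource-broker | src/orb/infrastructure/storage/components/generic_serializer.py | normalize_field_names
-- ===== SOURCE A (Python) =====
-- from typing import Any, Callable, Generic, Optional, TypeVar
--
-- def normalize_field_names(
--     data: dict[str, Any],
--     field_mappings: dict[str, list[str]],
-- ) -> dict[str, Any]:
--     """Normalize field names from legacy formats.
--
--     Args:
--         data: Data dictionary with potentially legacy field names
--         field_mappings: Map of canonical name to list of legacy names
--
--     Returns:
--         Dictionary with normalized field names
--     """
--     result = {}
--
--     for canonical_name, legacy_names in field_mappings.items():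
--         # Try canonical name first
--         if canonical_name in data:
--             result[canonical_name] = data[canonical_name]
--             continue
--
--         # Try legacy names
--         for legacy_name in legacy_names:
--             if legacy_name in data:
--                 result[canonical_name] = data[legacy_name]
--                 break
--
--     # Copy any fields not in mappings
--     for key, value in data.items():
--         if key not in result:
--             result[key] = value
--
--     return result
-- ===== SOURCE B (Python) =====
-- def normalize_field_names(data, field_mappings):
--     """Normalize field names via an inverted alias index and a single sweep over data.
--
--     Build, once, a reverse index field-name -> [(canonical, priority)] (priority 0 is
--     the canonical name itself, then its legacy names in order).  One pass over data
--     then records, per canonical, the present source field with the lowest priority;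
--     finally emit canonicals in mapping order followed by the unmapped data fields.
--     """
--     index = {}
--     for canonical, legacy_names in field_mappings.items():
--         for priority, name in enumerate((canonical, *legacy_names)):
--             index.setdefault(name, []).append((canonical, priority))
--
--     best = {}
--     for key in data:
--         for canonical, priority in index.get(key, []):
--             entry = best.get(canonical)
--             if entry is None or priority < entry[0]:
--                 best[canonical] = (priority, key)
--
--     result = {}
--     for canonical in field_mappings:
--         entry = best.get(canonical)
--         if entry is not None:
--             result[canonical] = data[entry[1]]
--     for key, value in data.items():
--         if key not in result:
--             result[key] = value
--     return result
-- ===== Notes on version B (the rewrite author's own statement) =====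
-- stated objective: alternative
-- what changed: Replaces A's per-mapping scan of alias names probing data by an inverted index (field name -> (canonical, priority)) built once from the mappings, followed by a single sweep over data that records the lowest-priority present source per canonical; canonicals are then emitted in mapping order and unmapped data fields appended.
import Mathlib
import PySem

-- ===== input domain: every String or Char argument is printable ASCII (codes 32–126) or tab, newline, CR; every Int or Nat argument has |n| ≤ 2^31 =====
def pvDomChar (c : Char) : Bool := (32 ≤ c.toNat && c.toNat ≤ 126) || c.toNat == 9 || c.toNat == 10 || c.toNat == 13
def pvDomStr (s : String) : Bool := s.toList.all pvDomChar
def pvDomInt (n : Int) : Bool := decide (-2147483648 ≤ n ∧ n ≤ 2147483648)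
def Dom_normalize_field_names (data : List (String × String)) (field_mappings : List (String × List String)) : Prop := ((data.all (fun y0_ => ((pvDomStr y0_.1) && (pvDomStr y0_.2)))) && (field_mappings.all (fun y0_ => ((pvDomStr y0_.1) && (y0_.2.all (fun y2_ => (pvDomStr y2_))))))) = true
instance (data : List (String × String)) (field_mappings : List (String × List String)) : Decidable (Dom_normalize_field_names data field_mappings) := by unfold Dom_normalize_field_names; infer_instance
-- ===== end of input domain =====

-- ===== PORT A =====
-- B replaces A's per-mapping alias scan by an inverted index plus one sweep over data (objective: alternative).
-- Both ports read their dict arguments through PySem.Dict.ofList (Python dict semantics), so both are total.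

-- inner 'for legacy_name in legacy_names: … break' of A
def pvTryLegacy (d : PySem.Dict String String) : List String → Option String
  | [] => none
  | n :: rest =>
    match d.get? n with
    | some v => some v
    | none => pvTryLegacy d rest

def normalize_field_names (data : List (String × String)) (field_mappings : List (String × List String)) : List (String × String) :=
  let d := PySem.Dict.ofList data
  let m := PySem.Dict.ofList field_mappings
  let result : PySem.Dict String String :=
    m.items.foldl (fun r p =>
      match d.get? p.1 with
      | some v => r.insert p.1 v          -- canonical name present
      | none =>
        match pvTryLegacy d p.2 with      -- try legacy names
        | some v => r.insert p.1 v
        | none => r) PySem.Dict.empty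
  let result :=
    d.items.foldl (fun r kv => if r.contains kv.1 then r else r.insert kv.1 kv.2) result
  result.items

-- ===== PORT B =====
def normalize_field_names_alt (data : List (String × String)) (field_mappings : List (String × List String)) : List (String × String) :=
  let d := PySem.Dict.ofList data
  let m := PySem.Dict.ofList field_mappings
  -- index = {}; for canonical, legacy in mappings: for priority, name in enumerate((canonical, *legacy)):
  --   index.setdefault(name, []).append((canonical, priority))
  let index : PySem.Dict String (List (String × Int)) :=
    m.items.foldl (fun idx p =>
      (PySem.List.enumerate (p.1 :: p.2) 0).foldl
        (fun idx e => idx.insert e.2 (idx.getD e.2 [] ++ [(p.1, e.1)])) idx)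
      PySem.Dict.empty
  -- best = {}; for key in data: for canonical, priority in index.get(key, []): keep lowest priority
  let best : PySem.Dict String (Int × String) :=
    d.keys.foldl (fun b k =>
      (index.getD k []).foldl (fun b e =>
        match b.get? e.1 with
        | none => b.insert e.1 (e.2, k)
        | some je => if e.2 < je.1 then b.insert e.1 (e.2, k) else b) b)
      PySem.Dict.empty
  -- result = {}: canonicals in mapping order whose best source exists
  let result : PySem.Dict String String :=
    m.items.foldl (fun r p =>
      match best.get? p.1 with
      | some je =>
        match d.get? je.2 with
        | some v => r.insert p.1 v
        | none => r                       -- unreachable: je.2 is a key of data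
      | none => r) PySem.Dict.empty
  -- for key, value in data.items(): if key not in result: result[key] = value
  let result :=
    d.items.foldl (fun r kv => if r.contains kv.1 then r else r.insert kv.1 kv.2) result
  result.items

-- ===== PRECONDITION & SPEC =====
def Spec_normalize_field_names (data : List (String × String)) (field_mappings : List (String × List String)) (out : List (String × String)) : Prop := out = normalize_field_names_alt data field_mappings
instance (data : List (String × String)) (field_mappings : List (String × List String)) (out : List (String × String)) : Decidable (Spec_normalize_field_names data field_mappings out) := by unfold Spec_normalize_field_names; infer_instance

-- ===== CLAIM (what is proved, stated in full; the proofs are below) =====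
def Claim_equal_normalize_field_names : Prop := ∀ (data : List (String × String)) (field_mappings : List (String × List String)), Dom_normalize_field_names data field_mappings → Spec_normalize_field_names data field_mappings (normalize_field_names data field_mappings)

-- ===== LEMMAS AND PROOFS =====

-- A's per-mapping resolution: canonical first, then first legacy name present
def pvResA (d : PySem.Dict String String) (p : String × List String) : Option String :=
  match d.get? p.1 with
  | some v => some v
  | none => pvTryLegacy d p.2

-- B's "keep the lowest priority" update
def pvUpd (o : Option (Int × String)) (i : Int) (k : String) : Option (Int × String) :=
  match o with
  | none => some (i, k)
  | some je => if i < je.1 then some (i, k) else some je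

-- index (from s) of the first occurrence of k in an alias list
def pvFirstIdx (k : String) : List String → Int → Option Int
  | [], _ => none
  | n :: rest, i => if n = k then some i else pvFirstIdx k rest (i + 1)

-- first alias (with its index from s) that is a member of K
def pvFirst (K : List String) : List String → Int → Option (Int × String)
  | [], _ => none
  | n :: rest, i => if K.contains n then some (i, n) else pvFirst K rest (i + 1)

-- merge two candidates: strictly smaller priority on the right wins
def pvMerge (o y : Option (Int × String)) : Option (Int × String) :=
  match y with
  | none => o
  | some ik => pvUpd o ik.1 ik.2

theorem pvTryLegacy_eq (d : PySem.Dict String String) (l : List String) :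
    pvTryLegacy d l = (l.find? (fun n => d.contains n)).bind (fun n => d.get? n) := by
  induction l with
  | nil => rfl
  | cons n rest ih =>
    simp only [pvTryLegacy, List.find?_cons]
    rw [PySem.Dict.contains_eq_isSome_get?]
    cases h : d.get? n with
    | none => simpa [h] using ih
    | some v => simp [h]

theorem pvResA_eq (d : PySem.Dict String String) (p : String × List String) :
    pvResA d p = ((p.1 :: p.2).find? (fun n => d.contains n)).bind (fun n => d.get? n) := by
  simp only [pvResA, List.find?_cons]
  rw [PySem.Dict.contains_eq_isSome_get?]
  cases h : d.get? p.1 with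
  | none => simpa [h] using pvTryLegacy_eq d p.2
  | some v => simp [h]

-- the mapping loop over fresh distinct keys appends its hits (shared by both ports)
theorem pvPhase1 (f : (String × List String) → Option String) (L : List (String × List String))
    (r : PySem.Dict String String)
    (hnd : (L.map Prod.fst).Nodup) (hfresh : ∀ p ∈ L, r.contains p.1 = false) :
    (L.foldl (fun r p =>
      match f p with
      | some v => r.insert p.1 v
      | none => r) r).items
    = r.items ++ L.filterMap (fun p => (f p).map (fun v => (p.1, v))) := by
  induction L generalizing r with
  | nil => simp
  | cons p rest ih =>
    simp only [List.map_cons, List.nodup_cons] at hnd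
    have hf : r.contains p.1 = false := hfresh p (List.mem_cons_self)
    simp only [List.foldl_cons, List.filterMap_cons]
    cases hres : f p with
    | none =>
      rw [ih r hnd.2 (fun q hq => hfresh q (List.mem_cons_of_mem _ hq))]
      simp
    | some v =>
      rw [ih (r.insert p.1 v) hnd.2 ?_]
      · rw [PySem.Dict.items_insert_of_not_contains r v hf]
        simp
      · intro q hq
        rw [PySem.Dict.contains_insert]
        have hne : q.1 ≠ p.1 := by
          intro h; exact hnd.1 (h ▸ List.mem_map_of_mem hq)
        simp [hne, hfresh q (List.mem_cons_of_mem _ hq)]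

-- phase 2: the copy loop over distinct keys appends exactly the unclaimed entries
theorem pvPhase2 (L : List (String × String)) (r : PySem.Dict String String)
    (hnd : (L.map Prod.fst).Nodup) :
    (L.foldl (fun r kv => if r.contains kv.1 then r else r.insert kv.1 kv.2) r).items
    = r.items ++ L.filter (fun kv => !(r.contains kv.1)) := by
  induction L generalizing r with
  | nil => simp
  | cons kv rest ih =>
    simp only [List.map_cons, List.nodup_cons] at hnd
    simp only [List.foldl_cons, List.filter_cons]
    cases h : r.contains kv.1 with
    | true => simp [ih r hnd.2]
    | false =>
      have hcong : ∀ q ∈ rest, (r.insert kv.1 kv.2).contains q.1 = r.contains q.1 := by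
        intro q hq
        rw [PySem.Dict.contains_insert]
        have hne : q.1 ≠ kv.1 := by
          intro hEq; exact hnd.1 (hEq ▸ List.mem_map_of_mem hq)
        simp [hne]
      rw [show (if (false = true) then r else r.insert kv.1 kv.2) = r.insert kv.1 kv.2 from rfl,
          ih (r.insert kv.1 kv.2) hnd.2,
          PySem.Dict.items_insert_of_not_contains r kv.2 h,
          List.filter_congr (fun q hq => by rw [hcong q hq])]
      simp

-- the index-building inner fold, observed through getD at one name
theorem pvIndexInner (E : List (Int × String)) (idx : PySem.Dict String (List (String × Int)))
    (c name : String) :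
    (E.foldl (fun idx e => idx.insert e.2 (idx.getD e.2 [] ++ [(c, e.1)])) idx).getD name []
    = idx.getD name [] ++ E.filterMap (fun e => if e.2 = name then some (c, e.1) else none) := by
  induction E generalizing idx with
  | nil => simp
  | cons e rest ih =>
    simp only [List.foldl_cons, List.filterMap_cons, ih]
    by_cases h : e.2 = name
    · subst h
      rw [PySem.Dict.getD_insert_self]
      simp
    · rw [PySem.Dict.getD_insert_of_ne idx _ [] (Ne.symm h)]
      simp [h]

-- per-mapping contribution of key `name` to the index
def pvContrib (p : String × List String) (name : String) : List (String × Int) :=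
  (PySem.List.enumerate (p.1 :: p.2) 0).filterMap
    (fun e => if e.2 = name then some (p.1, e.1) else none)

-- the whole index, observed through getD at one name
theorem pvIndexChar (M : List (String × List String)) (name : String) :
    (M.foldl (fun idx p =>
      (PySem.List.enumerate (p.1 :: p.2) 0).foldl
        (fun idx e => idx.insert e.2 (idx.getD e.2 [] ++ [(p.1, e.1)])) idx)
      PySem.Dict.empty).getD name []
    = M.flatMap (fun p => pvContrib p name) := by
  have gen : ∀ (M : List (String × List String)) (idx : PySem.Dict String (List (String × Int))),
      (M.foldl (fun idx p =>
        (PySem.List.enumerate (p.1 :: p.2) 0).foldl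
          (fun idx e => idx.insert e.2 (idx.getD e.2 [] ++ [(p.1, e.1)])) idx) idx).getD name []
      = idx.getD name [] ++ M.flatMap (fun p => pvContrib p name) := by
    intro M idx
    induction M generalizing idx with
    | nil => simp
    | cons p rest ih =>
      simp only [List.foldl_cons, List.flatMap_cons, ih, pvIndexInner, pvContrib]
      simp
  simpa using gen M PySem.Dict.empty

-- the best-building inner fold, observed through get? at one canonical
theorem pvBestInner (k : String) (E : List (String × Int)) (b : PySem.Dict String (Int × String))
    (c : String) :
    (E.foldl (fun b e =>
      match b.get? e.1 with
      | none => b.insert e.1 (e.2, k)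
      | some je => if e.2 < je.1 then b.insert e.1 (e.2, k) else b) b).get? c
    = E.foldl (fun o e => if e.1 = c then pvUpd o e.2 k else o) (b.get? c) := by
  induction E generalizing b with
  | nil => simp
  | cons e rest ih =>
    simp only [List.foldl_cons]
    rw [ih]
    congr 1
    by_cases h : e.1 = c
    · subst h
      cases hb : b.get? e.1 with
      | none => simp [pvUpd, PySem.Dict.get?_insert_self]
      | some je =>
        simp only [pvUpd]
        split_ifs with hlt
        · simp [PySem.Dict.get?_insert_self]
        · simp [hb]
    · have hne : c ≠ e.1 := Ne.symm h
      cases hb : b.get? e.1 with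
      | none => simp [h, PySem.Dict.get?_insert_of_ne _ _ hne]
      | some je =>
        simp only [if_neg h]
        split_ifs with hlt
        · simp [PySem.Dict.get?_insert_of_ne _ _ hne]
        · rfl

-- the best-building outer fold, observed through get? at one canonical
theorem pvBestOuter (F : String → List (String × Int)) (K : List String)
    (b : PySem.Dict String (Int × String)) (c : String) :
    (K.foldl (fun b k =>
      (F k).foldl (fun b e =>
        match b.get? e.1 with
        | none => b.insert e.1 (e.2, k)
        | some je => if e.2 < je.1 then b.insert e.1 (e.2, k) else b) b) b).get? c
    = K.foldl (fun o k => (F k).foldl (fun o e => if e.1 = c then pvUpd o e.2 k else o) o) (b.get? c) := by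
  induction K generalizing b with
  | nil => rfl
  | cons k K ih =>
    simp only [List.foldl_cons]
    rw [ih, pvBestInner]

-- entries with a foreign canonical do not move the candidate
theorem pvFoldForeign (c k : String) (E : List (String × Int)) (o : Option (Int × String))
    (h : ∀ e ∈ E, e.1 ≠ c) :
    E.foldl (fun o e => if e.1 = c then pvUpd o e.2 k else o) o = o := by
  induction E generalizing o with
  | nil => rfl
  | cons e rest ih =>
    simp only [List.foldl_cons, if_neg (h e List.mem_cons_self)]
    exact ih _ (fun e he => h e (List.mem_cons_of_mem _ he))

-- absorb: once a candidate with priority ≤ every remaining one is held, nothing changes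
theorem pvFoldAbsorb (c k : String) (E : List (String × Int)) (je : Int × String)
    (h : ∀ e ∈ E, je.1 ≤ e.2) :
    E.foldl (fun o e => if e.1 = c then pvUpd o e.2 k else o) (some je) = some je := by
  induction E with
  | nil => rfl
  | cons e rest ih =>
    have hle := h e List.mem_cons_self
    have hstep : (if e.1 = c then pvUpd (some je) e.2 k else some je) = some je := by
      split_ifs with hc
      · simp [pvUpd, not_lt.mpr hle]
      · rfl
    simp only [List.foldl_cons, hstep]
    exact ih (fun e he => h e (List.mem_cons_of_mem _ he))

-- every pair a contribution holds carries the mapping's own canonical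
theorem pvContrib_fst (p : String × List String) (k : String) (e : String × Int)
    (he : e ∈ pvContrib p k) : e.1 = p.1 := by
  simp only [pvContrib] at he
  obtain ⟨a, _, hfa⟩ := List.mem_filterMap.mp he
  split_ifs at hfa with h
  rw [← Option.some.inj hfa]

-- indices in a contribution start at the enumeration's start
theorem pvContribBound (c k : String) (A : List String) (s : Int) :
    ∀ e ∈ (PySem.List.enumerate A s).filterMap
      (fun e => if e.2 = k then some (c, e.1) else none), s ≤ e.2 := by
  intro e he
  obtain ⟨a, ha, hfa⟩ := List.mem_filterMap.mp he
  split_ifs at hfa with h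
  obtain ⟨j, hj, hpa⟩ := (PySem.List.mem_enumerate_iff _ _ _).mp ha
  rw [← Option.some.inj hfa, hpa]
  simp

-- the own-canonical contribution collapses to one update at the first occurrence
theorem pvFoldOwn (c k : String) (A : List String) (s : Int) (o : Option (Int × String)) :
    ((PySem.List.enumerate A s).filterMap
      (fun e => if e.2 = k then some (c, e.1) else none)).foldl
      (fun o e => if e.1 = c then pvUpd o e.2 k else o) o
    = match pvFirstIdx k A s with
      | none => o
      | some i => pvUpd o i k := by
  induction A generalizing s o with
  | nil => simp [PySem.List.enumerate_nil, pvFirstIdx]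
  | cons n rest ih =>
    rw [PySem.List.enumerate_cons]
    simp only [List.filterMap_cons, pvFirstIdx]
    by_cases h : n = k
    · simp only [if_pos h, List.foldl_cons]
      obtain ⟨je, hje, hle⟩ : ∃ je, pvUpd o s k = some je ∧ je.1 ≤ s := by
        cases o with
        | none => exact ⟨(s, k), rfl, le_refl s⟩
        | some je0 =>
          by_cases hlt : s < je0.1
          · exact ⟨(s, k), by simp [pvUpd, hlt], le_refl s⟩
          · exact ⟨je0, by simp [pvUpd, hlt], by omega⟩
      rw [hje]
      exact pvFoldAbsorb c k _ je (fun e he => by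
        have := pvContribBound c k rest (s + 1) e he; omega)
    · simp only [if_neg h]
      exact ih (s + 1) o

-- folding the whole index contribution at canonical c = one update at c's first matching alias
theorem pvFoldFlat (c k : String) (legacy : List String) (M : List (String × List String))
    (hnd : (M.map Prod.fst).Nodup) (hp : (c, legacy) ∈ M) (o : Option (Int × String)) :
    (M.flatMap (fun p => pvContrib p k)).foldl
      (fun o e => if e.1 = c then pvUpd o e.2 k else o) o
    = match pvFirstIdx k (c :: legacy) 0 with
      | none => o
      | some i => pvUpd o i k := by
  induction M generalizing o with
  | nil => cases hp
  | cons q rest ih =>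
    simp only [List.map_cons, List.nodup_cons] at hnd
    simp only [List.flatMap_cons, List.foldl_append]
    rcases List.mem_cons.mp hp with hq | hq
    · have hforeign : ∀ e ∈ rest.flatMap (fun p => pvContrib p k), e.1 ≠ c := by
        intro e he hec
        obtain ⟨p, hpmem, hpe⟩ := List.mem_flatMap.mp he
        have he1 : e.1 = p.1 := pvContrib_fst p k e hpe
        apply hnd.1
        have : q.1 = c := by rw [← hq]
        rw [this, ← hec, he1]
        exact List.mem_map_of_mem hpmem
      rw [pvFoldForeign c k _ _ hforeign, ← hq]
      simpa [pvContrib] using pvFoldOwn c k (c :: legacy) 0 o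
    · have hqc : ∀ e ∈ pvContrib q k, e.1 ≠ c := by
        intro e he hec
        apply hnd.1
        rw [← pvContrib_fst q k e he, hec]
        have : c ∈ rest.map Prod.fst := by
          have := List.mem_map_of_mem (f := Prod.fst) hq
          simpa using this
        exact this
      rw [pvFoldForeign c k _ _ hqc]
      exact ih hnd.2 hq o

theorem pvMerge_assoc (o y z : Option (Int × String)) :
    pvMerge (pvMerge o y) z = pvMerge o (pvMerge y z) := by
  rcases z with _ | ⟨l, e⟩
  · rfl
  rcases y with _ | ⟨j, b⟩
  · rfl
  show pvUpd (pvUpd o j b) l e = pvMerge o (pvUpd (some (j, b)) l e)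
  by_cases hlj : l < j
  · rw [show pvUpd (some (j, b)) l e = some (l, e) by simp [pvUpd, hlj]]
    rcases o with _ | ⟨i, a⟩
    · simp [pvUpd, pvMerge, hlj]
    · by_cases hji : j < i
      · rw [show pvUpd (some (i, a)) j b = some (j, b) by simp [pvUpd, hji]]
        simp [pvUpd, pvMerge, hlj, show l < i by omega]
      · rw [show pvUpd (some (i, a)) j b = some (i, a) by simp [pvUpd, hji]]
        rfl
  · rw [show pvUpd (some (j, b)) l e = some (j, b) by simp [pvUpd, hlj]]
    rcases o with _ | ⟨i, a⟩
    · simp [pvUpd, pvMerge, hlj]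
    · by_cases hji : j < i
      · rw [show pvUpd (some (i, a)) j b = some (j, b) by simp [pvUpd, hji]]
        simp [pvUpd, pvMerge, hlj, hji]
      · rw [show pvUpd (some (i, a)) j b = some (i, a) by simp [pvUpd, hji]]
        simp [pvUpd, pvMerge, hji, show ¬ l < i by omega]

-- pull the accumulator out of the per-key fold
theorem pvFoldlMerge (A : List String) (K : List String) (o : Option (Int × String)) :
    K.foldl (fun o k => match pvFirstIdx k A 0 with | none => o | some i => pvUpd o i k) o
    = pvMerge o (K.foldl (fun o k => match pvFirstIdx k A 0 with | none => o | some i => pvUpd o i k) none) := by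
  induction K generalizing o with
  | nil => simp [pvMerge]
  | cons k K ih =>
    simp only [List.foldl_cons]
    rw [ih, ih (o := (match pvFirstIdx k A 0 with | none => none | some i => pvUpd none i k))]
    have hstep : ∀ (o : Option (Int × String)),
        (match pvFirstIdx k A 0 with | none => o | some i => pvUpd o i k)
        = pvMerge o (match pvFirstIdx k A 0 with | none => none | some i => pvUpd none i k) := by
      intro o
      cases pvFirstIdx k A 0 <;> simp [pvMerge, pvUpd]
    rw [hstep o, hstep none, pvMerge_assoc]

theorem pvFirstIdx_bound (k : String) (A : List String) (s i : Int)
    (h : pvFirstIdx k A s = some i) : s ≤ i := by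
  induction A generalizing s with
  | nil => cases h
  | cons n rest ih =>
    simp only [pvFirstIdx] at h
    split_ifs at h with h1
    · cases h; omega
    · have := ih (s + 1) h; omega

theorem pvFirst_bound (K A : List String) (s : Int) (je : Int × String)
    (h : pvFirst K A s = some je) : s ≤ je.1 := by
  induction A generalizing s with
  | nil => cases h
  | cons n rest ih =>
    simp only [pvFirst] at h
    split_ifs at h with h1
    · cases h; simp
    · have := ih (s + 1) h; omega

-- adding one key to the allowed set merges its own first occurrence
theorem pvFirst_cons (k : String) (K A : List String) (s : Int) :
    pvFirst (k :: K) A s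
    = pvMerge (match pvFirstIdx k A s with | none => none | some i => some (i, k)) (pvFirst K A s) := by
  induction A generalizing s with
  | nil => simp [pvFirst, pvFirstIdx, pvMerge]
  | cons n rest ih =>
    by_cases h1 : n = k
    · subst h1
      by_cases h2 : n ∈ K
      · simp [pvFirst, pvFirstIdx, pvMerge, pvUpd, h2]
      · cases hr : pvFirst K rest (s + 1) with
        | none => simp [pvFirst, pvFirstIdx, pvMerge, h2, hr]
        | some je =>
          have hb := pvFirst_bound K rest (s + 1) je hr
          simp [pvFirst, pvFirstIdx, pvMerge, pvUpd, h2, hr, show ¬ je.1 < s by omega]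
    · by_cases h2 : n ∈ K
      · cases hik : pvFirstIdx k rest (s + 1) with
        | none => simp [pvFirst, pvFirstIdx, pvMerge, pvUpd, h1, h2, hik]
        | some i =>
          have hb := pvFirstIdx_bound k rest (s + 1) i hik
          simp [pvFirst, pvFirstIdx, pvMerge, pvUpd, h1, h2, hik, show s < i by omega]
      · simpa [pvFirst, pvFirstIdx, h1, h2] using ih (s + 1)

-- the sweep over the data keys computes the first alias present in them
theorem pvSweep (A : List String) (K : List String) :
    K.foldl (fun o k => match pvFirstIdx k A 0 with | none => o | some i => pvUpd o i k) none
    = pvFirst K A 0 := by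
  have hnil : ∀ (A : List String) (s : Int), pvFirst [] A s = none := by
    intro A
    induction A with
    | nil => intro s; rfl
    | cons n rest ih => intro s; simpa [pvFirst] using ih (s + 1)
  induction K with
  | nil => simp [hnil]
  | cons k K ih =>
    simp only [List.foldl_cons]
    rw [pvFoldlMerge, ih, pvFirst_cons]
    cases pvFirstIdx k A 0 <;> rfl

theorem pvFirst_find? (d : PySem.Dict String String) (A : List String) (s : Int) :
    (pvFirst d.keys A s).map Prod.snd = A.find? (fun n => d.contains n) := by
  induction A generalizing s with
  | nil => simp [pvFirst]
  | cons n rest ih =>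
    have hm : (n ∈ d.keys) ↔ d.contains n = true := by
      rw [PySem.Dict.contains_eq_decide_mem_keys]
      simp
    cases hcc : d.contains n with
    | true => simp [pvFirst, hcc, hm.mpr hcc]
    | false =>
      have hnm : n ∉ d.keys := fun h => by simp [hm.mp h] at hcc
      simp [pvFirst, hcc, hnm, ih]

-- ===== VERDICT (by name: the statement is the Claim_ definition above) =====
theorem normalize_field_names_spec : Claim_equal_normalize_field_names := by
  intro data field_mappings _
  unfold Spec_normalize_field_names normalize_field_names normalize_field_names_alt
  dsimp only
  have hdnd : ((PySem.Dict.ofList data).items.map Prod.fst).Nodup :=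
    PySem.Dict.nodup_keys_ofList data
  have hmnd : ((PySem.Dict.ofList field_mappings).items.map Prod.fst).Nodup :=
    PySem.Dict.nodup_keys_ofList field_mappings
  generalize PySem.Dict.ofList data = d at hdnd ⊢
  generalize PySem.Dict.ofList field_mappings = m at hmnd ⊢
  set best := d.keys.foldl (fun b k =>
      ((m.items.foldl (fun idx p =>
          (PySem.List.enumerate (p.1 :: p.2) 0).foldl
            (fun idx e => idx.insert e.2 (idx.getD e.2 [] ++ [(p.1, e.1)])) idx)
        PySem.Dict.empty).getD k []).foldl (fun b e =>
        match b.get? e.1 with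
        | none => b.insert e.1 (e.2, k)
        | some je => if e.2 < je.1 then b.insert e.1 (e.2, k) else b) b)
      PySem.Dict.empty with hbestdef
  -- B's best dict, observed at each canonical of the mappings
  have hbest : ∀ p ∈ m.items, best.get? p.1 = pvFirst d.keys (p.1 :: p.2) 0 := by
    intro p hp
    rw [hbestdef, pvBestOuter]
    have hget : (PySem.Dict.empty : PySem.Dict String (Int × String)).get? p.1 = none := rfl
    rw [hget]
    simp only [pvIndexChar]
    have hfun : (fun (o : Option (Int × String)) k =>
        (m.items.flatMap (fun p' => pvContrib p' k)).foldl
          (fun o e => if e.1 = p.1 then pvUpd o e.2 k else o) o)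
        = fun o k => match pvFirstIdx k (p.1 :: p.2) 0 with
          | none => o
          | some i => pvUpd o i k := by
      funext o k
      exact pvFoldFlat p.1 k p.2 m.items hmnd (by simpa using hp) o
    rw [hfun, pvSweep]
  -- B's per-canonical resolution equals A's
  have hres : ∀ p ∈ m.items,
      (best.get? p.1).bind (fun je => d.get? je.2) = pvResA d p := by
    intro p hp
    rw [hbest p hp, pvResA_eq, ← pvFirst_find? d (p.1 :: p.2) 0]
    cases pvFirst d.keys (p.1 :: p.2) 0 <;> rfl
  -- both mapping loops have the generic "insert if resolved" shape
  have hstepA : (fun (r : PySem.Dict String String) (p : String × List String) =>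
      match d.get? p.1 with
      | some v => r.insert p.1 v
      | none =>
        match pvTryLegacy d p.2 with
        | some v => r.insert p.1 v
        | none => r)
      = fun (r : PySem.Dict String String) (p : String × List String) =>
        match pvResA d p with | some v => r.insert p.1 v | none => r := by
    funext r p
    unfold pvResA
    cases d.get? p.1 <;> cases pvTryLegacy d p.2 <;> rfl
  have hstepB : (fun (r : PySem.Dict String String) (p : String × List String) =>
      match best.get? p.1 with
      | some je =>
        match d.get? je.2 with
        | some v => r.insert p.1 v
        | none => r
      | none => r)
      = fun (r : PySem.Dict String String) (p : String × List String) =>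
        match (best.get? p.1).bind (fun je => d.get? je.2) with
        | some v => r.insert p.1 v
        | none => r := by
    funext r p
    cases best.get? p.1 with
    | none => rfl
    | some je => cases d.get? je.2 <;> rfl
  rw [hstepA, hstepB]
  rw [pvPhase2 d.items _ hdnd, pvPhase2 d.items _ hdnd]
  rw [pvPhase1 (pvResA d) m.items PySem.Dict.empty hmnd (by simp),
      pvPhase1 (fun p => (best.get? p.1).bind (fun je => d.get? je.2)) m.items PySem.Dict.empty hmnd (by simp)]
  have hmap : m.items.filterMap
        (fun p => ((best.get? p.1).bind (fun je => d.get? je.2)).map (fun v => (p.1, v)))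
      = m.items.filterMap (fun p => (pvResA d p).map (fun v => (p.1, v))) :=
    List.filterMap_congr (fun p hp => by rw [hres p hp])
  rw [hmap]
  have hcont : ∀ x,
      (m.items.foldl (fun r p => match pvResA d p with | some v => r.insert p.1 v | none => r)
        PySem.Dict.empty).contains x
      = (m.items.foldl (fun r p =>
          match (best.get? p.1).bind (fun je => d.get? je.2) with
          | some v => r.insert p.1 v
          | none => r) PySem.Dict.empty).contains x := by
    intro x
    rw [PySem.Dict.contains_eq_decide_mem_keys, PySem.Dict.contains_eq_decide_mem_keys]
    have hk : (m.items.foldl (fun r p => match pvResA d p with | some v => r.insert p.1 v | none => r)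
        PySem.Dict.empty).keys
        = (m.items.foldl (fun r p =>
            match (best.get? p.1).bind (fun je => d.get? je.2) with
            | some v => r.insert p.1 v
            | none => r) PySem.Dict.empty).keys := by
      simp only [PySem.Dict.keys]
      rw [pvPhase1 (pvResA d) m.items PySem.Dict.empty hmnd (by simp),
          pvPhase1 (fun p => (best.get? p.1).bind (fun je => d.get? je.2)) m.items PySem.Dict.empty hmnd (by simp),
          hmap]
    rw [hk]
  rw [List.filter_congr (fun kv _ => by rw [hcont kv.1])]
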